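-- pv_equiv track=rewrite | github.com/yyxwjq/gpbb | gpbb/base.py | _split_tasks
-- ===== SOURCE A (Python) =====
-- from typing import Dict, List, Tuple, Optional, Set, Any
--
-- def _split_tasks(total_tasks: int, num_workers: int) -> List[Tuple[int, int]]:
--     """Split tasks evenly among workers"""
--     base_size = total_tasks // num_workers
--     remainder = total_tasks % num_workers
--
--     splits = []
--     start = 0
--
--     for i in range(num_workers):
--         size = base_size + (1 if i < remainder else 0)
--         if size > 0:
--             splits.append((start, start + size))
--             start += size
--
--     return splits
-- ===== SOURCE B (Python) =====
-- def _split_tasks(total_tasks, num_workers):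
--     """Split tasks evenly among workers (recursive divide-and-conquer on the
--     worker set: give the first half of the workers their balanced share of the
--     tasks, recurse on each half)."""
--     def rec(lo, n, k):
--         if k <= 0:
--             return []
--         if k == 1:
--             return [(lo, lo + n)] if n > 0 else []
--         kl = k // 2
--         base, rem = divmod(n, k)
--         left = kl * base + min(kl, rem)
--         return rec(lo, left, kl) + rec(lo + left, n - left, k - kl)
--     return rec(0, total_tasks, num_workers)
-- ===== Notes on version B (the rewrite author's own statement) =====
-- stated objective: alternative
-- what changed: Replaces A's single left-to-right loop with a running start accumulator by a recursive divide-and-conquer on the worker set: split the workers in half, compute the first half's balanced share in closed form, and recurse on each half; empty ranges vanish at the k=1 leaves instead of being skipped in a loop.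
import Mathlib
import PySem

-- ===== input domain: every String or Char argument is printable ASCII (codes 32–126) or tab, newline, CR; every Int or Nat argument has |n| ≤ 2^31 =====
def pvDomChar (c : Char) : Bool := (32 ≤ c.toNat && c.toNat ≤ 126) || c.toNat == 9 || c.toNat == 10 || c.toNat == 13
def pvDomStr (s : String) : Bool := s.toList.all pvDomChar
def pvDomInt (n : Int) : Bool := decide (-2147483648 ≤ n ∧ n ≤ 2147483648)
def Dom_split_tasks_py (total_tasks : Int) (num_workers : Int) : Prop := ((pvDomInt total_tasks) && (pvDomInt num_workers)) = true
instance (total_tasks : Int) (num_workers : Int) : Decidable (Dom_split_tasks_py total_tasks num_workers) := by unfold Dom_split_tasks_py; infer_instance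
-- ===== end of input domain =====

-- B replaces A's left-to-right loop with a recursive divide-and-conquer on the worker set (alternative decomposition; same cost).

-- ===== PORT A =====
def split_tasks_py (total_tasks : Int) (num_workers : Int) : List (Int × Int) :=
  let base_size := PySem.Int.floordiv total_tasks num_workers
  let remainder := PySem.Int.mod total_tasks num_workers
  let st := (PySem.List.pyRange 0 num_workers 1).foldl
    (fun (st : List (Int × Int) × Int) i =>
      let size := base_size + (if i < remainder then 1 else 0)
      if size > 0 then (st.1 ++ [(st.2, st.2 + size)], st.2 + size) else st)
    ([], 0)
  st.1

-- ===== PORT B =====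
-- Source B's inner 'rec(lo, n, k)': n tasks at offset lo shared among k workers,
-- split the workers in half and give the first half its balanced share in closed form.
def splitRec (lo n k : Int) : List (Int × Int) :=
  if k ≤ 0 then []
  else if k = 1 then (if n > 0 then [(lo, lo + n)] else [])
  else
    let kl := PySem.Int.floordiv k 2
    let left := kl * PySem.Int.floordiv n k + min kl (PySem.Int.mod n k)
    splitRec lo left kl ++ splitRec (lo + left) (n - left) (k - kl)
termination_by k.toNat
decreasing_by
  · have h2 : PySem.Int.floordiv k 2 = k / 2 :=
      PySem.Int.floordiv_eq_ediv_of_pos (by omega)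
    omega
  · have h2 : PySem.Int.floordiv k 2 = k / 2 :=
      PySem.Int.floordiv_eq_ediv_of_pos (by omega)
    omega

def split_tasks_py_alt (total_tasks : Int) (num_workers : Int) : List (Int × Int) :=
  splitRec 0 total_tasks num_workers

-- ===== PRECONDITION & SPEC =====
-- Pre_ excludes exactly num_workers = 0, where A raises ZeroDivisionError.
def Pre_split_tasks_py (total_tasks : Int) (num_workers : Int) : Prop := num_workers ≠ 0
instance (total_tasks : Int) (num_workers : Int) : Decidable (Pre_split_tasks_py total_tasks num_workers) := by unfold Pre_split_tasks_py; infer_instance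
def pvWitness_split_tasks_py : Int × Int := (10, 3)

def Spec_split_tasks_py (total_tasks : Int) (num_workers : Int) (out : List (Int × Int)) : Prop := out = split_tasks_py_alt total_tasks num_workers
instance (total_tasks : Int) (num_workers : Int) (out : List (Int × Int)) : Decidable (Spec_split_tasks_py total_tasks num_workers out) := by unfold Spec_split_tasks_py; infer_instance

-- ===== CLAIM (what is proved, stated in full; the proofs are below) =====
def Claim_equal_split_tasks_py : Prop := ∀ (total_tasks : Int) (num_workers : Int), Dom_split_tasks_py total_tasks num_workers → Pre_split_tasks_py total_tasks num_workers → Spec_split_tasks_py total_tasks num_workers (split_tasks_py total_tasks num_workers)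

-- ===== LEMMAS AND PROOFS =====

-- The closed-form boundary of worker i, and the per-worker description both programs compute.
def bFun (base rem i : Int) : Int := i * base + min i rem

def specF (lo n k : Int) : List (Int × Int) :=
  ((PySem.List.pyRange 0 k 1).filter
      (fun i => decide (bFun (PySem.Int.floordiv n k) (PySem.Int.mod n k) (i + 1)
        > bFun (PySem.Int.floordiv n k) (PySem.Int.mod n k) i))).map
    (fun i => (lo + bFun (PySem.Int.floordiv n k) (PySem.Int.mod n k) i,
      lo + bFun (PySem.Int.floordiv n k) (PySem.Int.mod n k) (i + 1)))

-- Unique characterisation of Python floordiv/mod for a positive divisor.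
lemma fdiv_unique (q r b : Int) (hb : 0 < b) (h0 : 0 ≤ r) (h1 : r < b) :
    PySem.Int.floordiv (q * b + r) b = q ∧ PySem.Int.mod (q * b + r) b = r := by
  have hq : PySem.Int.floordiv (q * b + r) b = q := by
    rw [PySem.Int.floordiv_eq_iff_of_pos hb]
    constructor
    · omega
    · have : (q + 1) * b = q * b + b := by ring
      omega
  refine ⟨hq, ?_⟩
  have := PySem.Int.floordiv_mul_add_mod (q * b + r) b
  rw [hq] at this
  omega

-- Loop invariant for A: the fold over range(num_workers) carries (the filtered/mapped
-- closed-form prefix, the next boundary when base ≥ 0, or the untouched 0 when base < 0).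
lemma split_loop (base rem : Int) (hrem : 0 ≤ rem) (n : Nat) :
    (PySem.List.pyRange 0 (n : Int) 1).foldl
      (fun (st : List (Int × Int) × Int) i =>
        let size := base + (if i < rem then 1 else 0)
        if size > 0 then (st.1 ++ [(st.2, st.2 + size)], st.2 + size) else st)
      ([], 0)
    = (((PySem.List.pyRange 0 (n : Int) 1).filter
         (fun i => decide (bFun base rem (i + 1) > bFun base rem i))).map
         (fun i => (bFun base rem i, bFun base rem (i + 1))),
       if 0 ≤ base then bFun base rem (n : Int) else 0) := by
  induction n with
  | zero =>
      simp [PySem.List.pyRange_one_eq_nil (by omega : (0:Int) ≤ 0), bFun]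
      omega
  | succ n ih =>
      have hcast : ((n + 1 : Nat) : Int) = (n : Int) + 1 := by push_cast; ring
      rw [hcast, PySem.List.pyRange_one_succ_right (by positivity)]
      rw [List.foldl_append, ih, List.filter_append, List.map_append]
      simp only [List.foldl_cons, List.foldl_nil, List.filter_cons, List.filter_nil,
        List.map_cons, List.map_nil]
      have hdiff : bFun base rem ((n : Int) + 1) - bFun base rem (n : Int)
          = base + (if (n : Int) < rem then 1 else 0) := by
        unfold bFun
        have hmul : ((n : Int) + 1) * base = (n : Int) * base + base := by ring
        split_ifs <;> omega
      by_cases hb : 0 ≤ base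
      · by_cases hs : base + (if (n : Int) < rem then 1 else 0) > 0
        · simp only [hs, if_pos, hb]
          have hdec : (decide (bFun base rem ((n:Int) + 1) > bFun base rem (n:Int))) = true := by
            simp; omega
          simp [hdec]
          omega
        · simp only [hs, hb, if_pos]
          have hdec : (decide (bFun base rem ((n:Int) + 1) > bFun base rem (n:Int))) = false := by
            simp
            omega
          simp [hdec]
          omega
      · have hsz : ¬ (base + (if (n : Int) < rem then 1 else 0) > 0) := by
          split_ifs <;> omega
        have hdec : (decide (bFun base rem ((n:Int) + 1) > bFun base rem (n:Int))) = false := by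
          simp
          split_ifs at hdiff hsz <;> omega
        simp [hsz, hdec, hb]

-- The divide step preserves the closed-form description: splitting the workers at kl = k // 2.
lemma specF_split (lo n k : Int) (hk : 2 ≤ k) :
    specF lo n k
      = specF lo
          (PySem.Int.floordiv k 2 * PySem.Int.floordiv n k
            + min (PySem.Int.floordiv k 2) (PySem.Int.mod n k))
          (PySem.Int.floordiv k 2)
        ++ specF
          (lo + (PySem.Int.floordiv k 2 * PySem.Int.floordiv n k
            + min (PySem.Int.floordiv k 2) (PySem.Int.mod n k)))
          (n - (PySem.Int.floordiv k 2 * PySem.Int.floordiv n k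
            + min (PySem.Int.floordiv k 2) (PySem.Int.mod n k)))
          (k - PySem.Int.floordiv k 2) := by
  have hkpos : (0:Int) < k := by omega
  set base := PySem.Int.floordiv n k with hbase
  set rem := PySem.Int.mod n k with hrem
  set kl := PySem.Int.floordiv k 2 with hkl
  have hkl2 : kl = k / 2 := PySem.Int.floordiv_eq_ediv_of_pos (by omega)
  have hklb : 1 ≤ kl ∧ kl < k := by omega
  have hremb : 0 ≤ rem ∧ rem < k :=
    ⟨PySem.Int.mod_nonneg n hkpos, PySem.Int.mod_lt n hkpos⟩
  have hn : base * k + rem = n := PySem.Int.floordiv_mul_add_mod n k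
  set left := kl * base + min kl rem with hleft
  -- quotient/remainder of the left recursive call
  have hLq : PySem.Int.floordiv left kl = base + (if kl ≤ rem then 1 else 0) ∧
      PySem.Int.mod left kl = (if kl ≤ rem then 0 else rem) := by
    by_cases hc : kl ≤ rem
    · have hrep : left = (base + 1) * kl + 0 := by
        have h1 : (base + 1) * kl = base * kl + kl := by ring
        have h2 : base * kl = kl * base := by ring
        omega
      rw [hrep, if_pos hc, if_pos hc]
      exact fdiv_unique (base + 1) 0 kl (by omega) (by omega) (by omega)
    · have hrep : left = base * kl + rem := by
        have h2 : base * kl = kl * base := by ring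
        omega
      rw [hrep, if_neg hc, if_neg hc]
      have h := fdiv_unique base rem kl (by omega) (by omega) (by omega)
      exact ⟨h.1.trans (by ring), h.2⟩
  -- quotient/remainder of the right recursive call
  have hRrep : n - left = base * (k - kl) + (rem - min kl rem) := by
    have h1 : base * (k - kl) = base * k - base * kl := by ring
    have h2 : base * kl = kl * base := by ring
    omega
  have hRq : PySem.Int.floordiv (n - left) (k - kl) = base ∧
      PySem.Int.mod (n - left) (k - kl) = rem - min kl rem := by
    rw [hRrep]
    exact fdiv_unique _ _ _ (by omega) (by omega) (by omega)
  -- boundary agreement on the left half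
  have hbL : ∀ i : Int, 0 ≤ i → i ≤ kl →
      bFun (PySem.Int.floordiv left kl) (PySem.Int.mod left kl) i = bFun base rem i := by
    intro i h0 h1
    rw [hLq.1, hLq.2]
    unfold bFun
    have h2 : i * (base + (if kl ≤ rem then 1 else 0)) = i * base + (if kl ≤ rem then i else 0) := by
      split_ifs <;> ring
    split_ifs at h2 ⊢ <;> omega
  -- boundary agreement on the right half (shifted by left)
  have hbR : ∀ j : Int, 0 ≤ j → j ≤ k - kl →
      left + bFun (PySem.Int.floordiv (n - left) (k - kl)) (PySem.Int.mod (n - left) (k - kl)) j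
        = bFun base rem (kl + j) := by
    intro j h0 h1
    rw [hRq.1, hRq.2]
    unfold bFun
    have h2 : (kl + j) * base = kl * base + j * base := by ring
    omega
  -- now the list computation
  show ((PySem.List.pyRange 0 k 1).filter _).map _ = _
  rw [PySem.List.pyRange_one_append 0 kl k (by omega) (by omega),
    List.filter_append, List.map_append]
  congr 1
  · -- left half
    unfold specF
    have hfil : (PySem.List.pyRange 0 kl 1).filter
          (fun i => decide (bFun base rem (i + 1) > bFun base rem i))
        = (PySem.List.pyRange 0 kl 1).filter
          (fun i => decide (bFun (PySem.Int.floordiv left kl) (PySem.Int.mod left kl) (i + 1)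
            > bFun (PySem.Int.floordiv left kl) (PySem.Int.mod left kl) i)) := by
      apply List.filter_congr
      intro i hi
      rw [PySem.List.mem_pyRange_one] at hi
      rw [hbL i (by omega) (by omega), hbL (i + 1) (by omega) (by omega)]
    rw [hfil]
    apply List.map_congr_left
    intro i hi
    have hi' := List.mem_of_mem_filter hi
    rw [PySem.List.mem_pyRange_one] at hi'
    rw [hbL i (by omega) (by omega), hbL (i + 1) (by omega) (by omega)]
  · -- right half, reindexed from kl…k to 0…k-kl
    unfold specF
    rw [PySem.List.pyRange_one kl k, PySem.List.pyRange_one 0 (k - kl)]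
    have hN : (k - kl - 0).toNat = (k - kl).toNat := by omega
    rw [hN]
    rw [List.filter_map, List.filter_map, List.map_map, List.map_map]
    have hfil : (List.range (k - kl).toNat).filter
          ((fun i => decide (bFun base rem (i + 1) > bFun base rem i)) ∘ (fun t : Nat => kl + (t : Int)))
        = (List.range (k - kl).toNat).filter
          ((fun i => decide (bFun (PySem.Int.floordiv (n - left) (k - kl))
              (PySem.Int.mod (n - left) (k - kl)) (i + 1)
            > bFun (PySem.Int.floordiv (n - left) (k - kl))
              (PySem.Int.mod (n - left) (k - kl)) i)) ∘ (fun t : Nat => 0 + (t : Int))) := by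
      apply List.filter_congr
      intro t ht
      rw [List.mem_range] at ht
      have ht' : (t : Int) ≤ k - kl - 1 := by omega
      have e1 := hbR (t : Int) (by omega) (by omega)
      have e2 := hbR ((t : Int) + 1) (by omega) (by omega)
      simp only [Function.comp_apply, zero_add, decide_eq_decide]
      have hx : kl + (t : Int) + 1 = kl + ((t : Int) + 1) := by ring
      rw [hx]
      omega
    rw [hfil]
    apply List.map_congr_left
    intro t ht
    have ht' := List.mem_of_mem_filter ht
    rw [List.mem_range] at ht'
    have e1 := hbR (t : Int) (by omega) (by omega)
    have e2 := hbR ((t : Int) + 1) (by omega) (by omega)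
    simp only [Function.comp_apply, zero_add]
    have hx : kl + (t : Int) + 1 = kl + ((t : Int) + 1) := by ring
    simp only [← hbase, ← hrem]
    rw [hx, Prod.mk.injEq]
    constructor <;> omega

-- B's recursion computes the closed-form description.
lemma splitRec_eq_specF (m : Nat) : ∀ (k lo n : Int), k.toNat ≤ m →
    splitRec lo n k = specF lo n k := by
  induction m with
  | zero =>
      intro k lo n hm
      have hk : k ≤ 0 := by omega
      rw [splitRec, if_pos hk]
      unfold specF
      rw [PySem.List.pyRange_one_eq_nil (by omega)]
      simp
  | succ m ih =>
      intro k lo n hm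
      by_cases h0 : k ≤ 0
      · rw [splitRec, if_pos h0]
        unfold specF
        rw [PySem.List.pyRange_one_eq_nil (by omega)]
        simp
      · by_cases h1 : k = 1
        · subst h1
          rw [splitRec]
          simp only [if_neg h0, if_pos rfl]
          unfold specF
          have hb : PySem.Int.floordiv n 1 = n := by
            rw [PySem.Int.floordiv_eq_ediv_of_pos (by omega)]; omega
          have hr : PySem.Int.mod n 1 = 0 := by
            have h := PySem.Int.floordiv_mul_add_mod n 1
            rw [hb] at h; omega
          rw [hb, hr]
          have hrange : PySem.List.pyRange 0 1 1 = [0] :=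
            PySem.List.pyRange_one_singleton 0
          rw [hrange]
          simp only [List.filter_cons, List.filter_nil]
          by_cases hn : n > 0
          · have hdec : (decide (bFun n 0 (0 + 1) > bFun n 0 0)) = true := by
              simp [bFun]; omega
            simp [hn, hdec, bFun]
          · have hdec : (decide (bFun n 0 (0 + 1) > bFun n 0 0)) = false := by
              simp [bFun]; omega
            simp [hn, hdec]
            simp only [bFun]
            omega
        · have hk2 : 2 ≤ k := by omega
          rw [splitRec]
          simp only [if_neg h0, if_neg h1]
          have hkl2 : PySem.Int.floordiv k 2 = k / 2 :=
            PySem.Int.floordiv_eq_ediv_of_pos (by omega)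
          rw [ih (PySem.Int.floordiv k 2) _ _ (by omega),
            ih (k - PySem.Int.floordiv k 2) _ _ (by omega)]
          exact (specF_split lo n k hk2).symm

-- ===== VERDICT (by name: the statement is the Claim_ definition above) =====
theorem split_tasks_py_spec : Claim_equal_split_tasks_py := by
  intro total_tasks num_workers _ hpre
  unfold Spec_split_tasks_py split_tasks_py split_tasks_py_alt
  by_cases hw : num_workers ≤ 0
  · rw [PySem.List.pyRange_one_eq_nil hw]
    rw [splitRec, if_pos hw]
    simp
  · rw [not_le] at hw
    have hrem : 0 ≤ PySem.Int.mod total_tasks num_workers :=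
      PySem.Int.mod_nonneg total_tasks hw
    obtain ⟨n, hn⟩ : ∃ n : Nat, num_workers = (n : Int) :=
      ⟨num_workers.toNat, by omega⟩
    subst hn
    rw [splitRec_eq_specF n.succ (n : Int) 0 total_tasks (by omega)]
    have := split_loop (PySem.Int.floordiv total_tasks n) (PySem.Int.mod total_tasks n) hrem n
    simp only [this]
    unfold specF
    simp only [zero_add]
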